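-- pv_equiv track=rewrite | github.com/pebblepaw/MiroWorld | backend/src/mckainsey/services/metrics_service.py | _stance_from_text
-- ===== SOURCE A (Python) =====
-- def _stance_from_text(text: str) -> str:
--     lowered = text.lower()
--     support_hits = sum(1 for token in ("support", "agree", "upside", "benefit", "positive", "yes", "pro") if token in lowered)
--     dissent_hits = sum(1 for token in ("risk", "concern", "oppose", "against", "problem", "negative", "no", "worry") if token in lowered)
--     if support_hits > dissent_hits:
--         return "supporter"
--     if dissent_hits > support_hits:
--         return "dissenter"
--     return "neutral"
-- ===== SOURCE B (Python) =====
-- _SUPPORT = ("support", "agree", "upside", "benefit", "positive", "yes", "pro")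
-- _DISSENT = ("risk", "concern", "oppose", "against", "problem", "negative", "no", "worry")
--
--
-- def _stance_from_text(text: str) -> str:
--     lowered = text.lower()
--     # Text-driven scan: walk the starting positions of the text once and
--     # collect the set of keywords that begin at each position.
--     found = set()
--     for i in range(len(lowered)):
--         for kw in _SUPPORT + _DISSENT:
--             if lowered.startswith(kw, i):
--                 found.add(kw)
--     support_found = found.intersection(_SUPPORT)
--     dissent_found = found.difference(_SUPPORT)
--     if len(support_found) > len(dissent_found):
--         return "supporter"
--     if len(dissent_found) > len(support_found):
--         return "dissenter"
--     return "neutral"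
-- ===== Notes on version B (the rewrite author's own statement) =====
-- stated objective: alternative
-- what changed: A asks, keyword by keyword, whether each substring occurs anywhere in the text and compares two counts; B walks the text's starting positions once, collecting the SET of keywords that begin at each position (text-driven multi-pattern scan), then compares the sizes of that set's intersection with and difference from the support table.
import Mathlib
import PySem

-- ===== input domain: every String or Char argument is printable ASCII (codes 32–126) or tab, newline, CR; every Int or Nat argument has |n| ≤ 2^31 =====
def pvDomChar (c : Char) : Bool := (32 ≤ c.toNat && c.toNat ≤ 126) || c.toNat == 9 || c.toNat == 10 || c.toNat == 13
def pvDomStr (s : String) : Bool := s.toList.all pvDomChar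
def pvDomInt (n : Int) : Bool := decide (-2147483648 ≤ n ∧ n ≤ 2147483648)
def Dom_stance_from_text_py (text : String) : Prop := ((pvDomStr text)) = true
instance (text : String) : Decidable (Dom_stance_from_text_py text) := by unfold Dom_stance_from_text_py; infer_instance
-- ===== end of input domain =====

-- B replaces A's keyword-driven substring queries by a single text-driven scan over starting positions collecting a set of matched keywords; alternative algorithm, same cost.


-- ===== PORT A =====
def stance_from_text_py (text : String) : String :=
  let lowered := PySem.Str.lower text
  let support_hits : Int :=
    ["support", "agree", "upside", "benefit", "positive", "yes", "pro"].foldl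
      (fun acc token => if PySem.Str.isIn token lowered then acc + 1 else acc) 0
  let dissent_hits : Int :=
    ["risk", "concern", "oppose", "against", "problem", "negative", "no", "worry"].foldl
      (fun acc token => if PySem.Str.isIn token lowered then acc + 1 else acc) 0
  if support_hits > dissent_hits then "supporter"
  else if dissent_hits > support_hits then "dissenter"
  else "neutral"

-- ===== PORT B =====
def supportKws : List String := ["support", "agree", "upside", "benefit", "positive", "yes", "pro"]
def dissentKws : List String := ["risk", "concern", "oppose", "against", "problem", "negative", "no", "worry"]

-- lowered.startswith(kw, i) is exactly 'the keyword is a prefix of the drop-i suffix'.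
def foundSet (L : List Char) : PySem.Set String :=
  (List.range L.length).foldl
    (fun found i =>
      (supportKws ++ dissentKws).foldl
        (fun found kw =>
          if PySem.Chars.startswith (L.drop i) kw.toList then PySem.Set.add found kw else found)
        found)
    PySem.Set.empty

def stance_from_text_py_alt (text : String) : String :=
  let found := foundSet (PySem.Str.lower text).toList
  let support_found := PySem.Set.inter found supportKws
  let dissent_found := PySem.Set.diff found supportKws
  if PySem.Set.len support_found > PySem.Set.len dissent_found then "supporter"
  else if PySem.Set.len dissent_found > PySem.Set.len support_found then "dissenter"
  else "neutral"

-- ===== PRECONDITION & SPEC =====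
def Spec_stance_from_text_py (text : String) (out : String) : Prop := out = stance_from_text_py_alt text
instance (text : String) (out : String) : Decidable (Spec_stance_from_text_py text out) := by unfold Spec_stance_from_text_py; infer_instance

-- ===== CLAIM (what is proved, stated in full; the proofs are below) =====
def Claim_equal_stance_from_text_py : Prop := ∀ (text : String), Dom_stance_from_text_py text → Spec_stance_from_text_py text (stance_from_text_py text)

-- ===== LEMMAS AND PROOFS =====

-- Membership after the inner fold over keywords at a fixed position.
theorem mem_inner_fold (P : String → Bool) (kws : List String) (s : PySem.Set String) (k : String) :
    k ∈ kws.foldl (fun s kw => if P kw then PySem.Set.add s kw else s) s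
      ↔ k ∈ s ∨ (k ∈ kws ∧ P k = true) := by
  induction kws generalizing s with
  | nil => simp
  | cons kw kws ih =>
    simp only [List.foldl_cons]
    by_cases h : P kw
    · simp only [h, if_pos]
      rw [ih]
      simp only [PySem.Set.mem_add, List.mem_cons]
      constructor
      · rintro ((hs | rfl) | ⟨hm, hp⟩)
        · exact Or.inl hs
        · exact Or.inr ⟨Or.inl rfl, h⟩
        · exact Or.inr ⟨Or.inr hm, hp⟩
      · rintro (hs | ⟨(rfl | hm), hp⟩)
        · exact Or.inl (Or.inl hs)
        · exact Or.inl (Or.inr rfl)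
        · exact Or.inr ⟨hm, hp⟩
    · simp only [h, Bool.false_eq_true]
      rw [ih]
      simp only [List.mem_cons]
      constructor
      · rintro (hs | ⟨hm, hp⟩)
        · exact Or.inl hs
        · exact Or.inr ⟨Or.inr hm, hp⟩
      · rintro (hs | ⟨(rfl | hm), hp⟩)
        · exact Or.inl hs
        · exact absurd hp h
        · exact Or.inr ⟨hm, hp⟩

-- Membership after the outer fold over positions.
theorem mem_outer_fold (Q : Nat → String → Bool) (kws : List String) (idxs : List Nat)
    (s : PySem.Set String) (k : String) :
    k ∈ idxs.foldl
        (fun s i => kws.foldl (fun s kw => if Q i kw then PySem.Set.add s kw else s) s) s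
      ↔ k ∈ s ∨ (k ∈ kws ∧ ∃ i ∈ idxs, Q i k = true) := by
  induction idxs generalizing s with
  | nil => simp
  | cons i idxs ih =>
    simp only [List.foldl_cons]
    rw [ih, mem_inner_fold]
    simp only [List.mem_cons]
    constructor
    · rintro ((hs | ⟨hm, hq⟩) | ⟨hm, j, hj, hq⟩)
      · exact Or.inl hs
      · exact Or.inr ⟨hm, i, Or.inl rfl, hq⟩
      · exact Or.inr ⟨hm, j, Or.inr hj, hq⟩
    · rintro (hs | ⟨hm, j, (rfl | hj), hq⟩)
      · exact Or.inl (Or.inl hs)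
      · exact Or.inl (Or.inr ⟨hm, hq⟩)
      · exact Or.inr ⟨hm, j, hj, hq⟩

-- A bounded position with a keyword prefix exists exactly when the keyword is a substring.
theorem exists_pos_startswith_iff (L : List Char) (kw : List Char) (hkw : kw ≠ []) :
    (∃ i ∈ List.range L.length, PySem.Chars.startswith (L.drop i) kw = true)
      ↔ PySem.Chars.isIn kw L = true := by
  rw [← PySem.Chars.exists_prefix_drop_iff_isIn]
  constructor
  · rintro ⟨i, _, h⟩
    exact ⟨i, (PySem.Chars.startswith_iff _ _).mp h⟩
  · rintro ⟨j, h⟩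
    by_cases hj : j < L.length
    · exact ⟨j, List.mem_range.mpr hj, (PySem.Chars.startswith_iff _ _).mpr h⟩
    · exfalso
      have : L.drop j = [] := List.drop_eq_nil_of_le (by omega)
      rw [this, List.prefix_nil] at h
      exact hkw h

-- Every keyword in the table is nonempty.
theorem kws_nonempty : ∀ kw ∈ supportKws ++ dissentKws, kw.toList ≠ [] := by decide

-- A keyword is in B's found set exactly when A's substring test succeeds.
theorem contains_found_eq (text : String) (kw : String) (hkw : kw ∈ supportKws ++ dissentKws) :
    PySem.Set.contains (foundSet (PySem.Str.lower text).toList) kw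
      = PySem.Str.isIn kw (PySem.Str.lower text) := by
  set L := (PySem.Str.lower text).toList with hL
  have hiff : PySem.Set.contains (foundSet L) kw = true
      ↔ PySem.Str.isIn kw (PySem.Str.lower text) = true := by
    unfold foundSet
    rw [PySem.Set.contains_iff,
        mem_outer_fold (fun i k => PySem.Chars.startswith (L.drop i) k.toList)
          (supportKws ++ dissentKws) (List.range L.length) PySem.Set.empty kw]
    simp only [PySem.Set.empty, List.not_mem_nil, false_or]
    rw [PySem.Str.isIn_eq, ← hL, ← exists_pos_startswith_iff L kw.toList (kws_nonempty kw hkw)]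
    constructor
    · rintro ⟨_, h⟩; exact h
    · intro h; exact ⟨hkw, h⟩
  by_cases hc : PySem.Str.isIn kw (PySem.Str.lower text)
  · rw [hc, hiff.mpr hc]
  · simp only [Bool.not_eq_true] at hc
    rw [hc]
    cases hres : PySem.Set.contains (foundSet L) kw
    · rfl
    · rw [hiff.mp hres] at hc
      simp at hc

-- The found set is duplicate-free.
theorem nodup_inner_fold (P : String → Bool) (kws : List String) (s : PySem.Set String)
    (h : s.Nodup) :
    (kws.foldl (fun s kw => if P kw then PySem.Set.add s kw else s) s).Nodup := by
  induction kws generalizing s with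
  | nil => exact h
  | cons kw kws ih =>
    simp only [List.foldl_cons]
    split
    · exact ih _ (PySem.Set.nodup_add _ _ h)
    · exact ih _ h

theorem nodup_outer_fold (P : Nat → String → Bool) (kws : List String) (idxs : List Nat)
    (s : PySem.Set String) (h : s.Nodup) :
    (idxs.foldl
      (fun s i => kws.foldl (fun s kw => if P i kw then PySem.Set.add s kw else s) s) s).Nodup := by
  induction idxs generalizing s with
  | nil => exact h
  | cons i idxs ih =>
    simp only [List.foldl_cons]
    exact ih _ (nodup_inner_fold _ _ _ h)

theorem nodup_found (L : List Char) : (foundSet L).Nodup :=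
  nodup_outer_fold _ _ _ _ List.nodup_nil

-- Everything in the found set is a keyword.
theorem found_subset (L : List Char) (k : String) (hk : k ∈ foundSet L) :
    k ∈ supportKws ++ dissentKws := by
  unfold foundSet at hk
  rw [mem_outer_fold] at hk
  rcases hk with h | ⟨h, _⟩
  · simp [PySem.Set.empty] at h
  · exact h

-- A counting fold is the length of the corresponding filter.
theorem fold_count_eq_filter (p : String → Bool) (l : List String) :
    l.foldl (fun acc x => if p x then acc + 1 else acc) (0 : Int)
      = ((l.filter p).length : Int) := by
  have key : ∀ (l : List String) (init : Int),
      l.foldl (fun acc x => if p x then acc + 1 else acc) init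
        = init + ((l.filter p).length : Int) := by
    intro l
    induction l with
    | nil => simp
    | cons x l ih =>
      intro init
      simp only [List.foldl_cons, List.filter_cons]
      by_cases h : p x
      · simp only [h, if_pos, ih, List.length_cons]
        push_cast
        ring
      · simp [h, ih]
  simpa using key l 0

-- Two duplicate-free lists with the same members have the same length.
theorem length_eq_of_nodup_of_mem_iff (l₁ l₂ : List String)
    (h₁ : l₁.Nodup) (h₂ : l₂.Nodup) (h : ∀ x, x ∈ l₁ ↔ x ∈ l₂) :
    l₁.length = l₂.length :=
  ((List.perm_ext_iff_of_nodup h₁ h₂).mpr h).length_eq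

theorem supportKws_nodup : supportKws.Nodup := by decide
theorem dissentKws_nodup : dissentKws.Nodup := by decide
theorem dissent_not_support : ∀ k ∈ dissentKws, k ∉ supportKws := by decide

-- |found ∩ support| is A's support count.
theorem len_inter_eq (text : String) :
    (PySem.Set.len (PySem.Set.inter (foundSet (PySem.Str.lower text).toList) supportKws) : Int)
      = supportKws.foldl
          (fun acc kw => if PySem.Str.isIn kw (PySem.Str.lower text) then acc + 1 else acc) 0 := by
  rw [fold_count_eq_filter]
  refine congrArg Nat.cast ?_
  apply length_eq_of_nodup_of_mem_iff
  · exact PySem.Set.nodup_inter _ _ (nodup_found _)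
  · exact supportKws_nodup.filter _
  · intro x
    rw [PySem.Set.mem_inter, List.mem_filter]
    constructor
    · rintro ⟨hf, hs⟩
      exact ⟨hs, by rw [← contains_found_eq text x (found_subset _ x hf)]
                    exact (PySem.Set.contains_iff _ _).mpr hf⟩
    · rintro ⟨hs, hi⟩
      refine ⟨?_, hs⟩
      rw [← PySem.Set.contains_iff (s := foundSet (PySem.Str.lower text).toList) (x := x)]
      rw [contains_found_eq text x (List.mem_append_left _ hs)]
      exact hi

-- |found \ support| is A's dissent count.
theorem len_diff_eq (text : String) :
    (PySem.Set.len (PySem.Set.diff (foundSet (PySem.Str.lower text).toList) supportKws) : Int)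
      = dissentKws.foldl
          (fun acc kw => if PySem.Str.isIn kw (PySem.Str.lower text) then acc + 1 else acc) 0 := by
  rw [fold_count_eq_filter]
  refine congrArg Nat.cast ?_
  apply length_eq_of_nodup_of_mem_iff
  · exact PySem.Set.nodup_diff _ _ (nodup_found _)
  · exact dissentKws_nodup.filter _
  · intro x
    rw [PySem.Set.mem_diff, List.mem_filter]
    constructor
    · rintro ⟨hf, hns⟩
      have hx := found_subset _ x hf
      rw [List.mem_append] at hx
      refine ⟨hx.resolve_left hns, ?_⟩
      rw [← contains_found_eq text x (found_subset _ x hf)]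
      exact (PySem.Set.contains_iff _ _).mpr hf
    · rintro ⟨hd, hi⟩
      refine ⟨?_, dissent_not_support x hd⟩
      rw [← PySem.Set.contains_iff (s := foundSet (PySem.Str.lower text).toList) (x := x)]
      rw [contains_found_eq text x (List.mem_append_right _ hd)]
      exact hi

-- ===== VERDICT (by name: the statement is the Claim_ definition above) =====
theorem stance_from_text_py_spec : Claim_equal_stance_from_text_py := by
  intro text _
  unfold Spec_stance_from_text_py stance_from_text_py stance_from_text_py_alt
  simp only []
  rw [show (["support", "agree", "upside", "benefit", "positive", "yes", "pro"] : List String)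
        = supportKws from rfl,
      show (["risk", "concern", "oppose", "against", "problem", "negative", "no", "worry"] : List String)
        = dissentKws from rfl,
      ← len_inter_eq text, ← len_diff_eq text]
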